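-- pv_equiv track=rewrite | github.com/mebeim/aoc | 2018/solutions/day10.py | search
-- ===== SOURCE A (Python) =====
-- def simulate(pts, t):
-- 	xs = [x + t*v for x,_,v,_ in pts]
-- 	ys = [y + t*v for _,y,_,v in pts]
-- 	return tuple(zip(xs, ys))
--
-- def box(pts):
-- 	minx, maxx = min(p[0] for p in pts), max(p[0] for p in pts)
-- 	miny, maxy = min(p[1] for p in pts), max(p[1] for p in pts)
-- 	return minx, miny, maxx-minx, maxy-miny
--
-- def search(pts):
-- 	t1 = 0
-- 	t2 = 1
-- 	f1 = box(simulate(pts, t1))[3]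
--
-- 	while f1 > box(simulate(pts, t2))[3]:
-- 		t2 <<= 1
--
-- 	while t1 != t2:
-- 		t = (t1 + t2)//2
-- 		m = box(simulate(pts, t    ))[3]
-- 		r = box(simulate(pts, t + 1))[3]
--
-- 		if r > m:
-- 			t2 = t
-- 		else:
-- 			t1 = t+1
--
-- 	return t1
-- ===== SOURCE B (Python) =====
-- def height(pts, t):
--     lo = hi = pts[0][1] + t * pts[0][3]
--     for _, y, _, vy in pts[1:]:
--         y += t * vy
--         if y < lo:
--             lo = y
--         elif y > hi:
--             hi = y
--     return hi - lo
--
--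
-- def search(pts):
--     # ternary search on the unimodal (convex) height over [0, 2**64]:
--     # keep the largest minimizer inside [lo, hi] by comparing the height at
--     # two interior probes, then scan the <= 3 remaining candidates.
--     lo, hi = 0, 1 << 64
--     while hi - lo >= 3:
--         third = (hi - lo) // 3
--         m1, m2 = lo + third, hi - third
--         if height(pts, m1) < height(pts, m2):
--             hi = m2 - 1
--         else:
--             lo = m1 + 1
--     best = lo
--     for t in range(lo + 1, hi + 1):
--         if height(pts, t) <= height(pts, best):
--             best = t
--     return best
-- ===== Notes on version B (the rewrite author's own statement) =====
-- stated objective: alternative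
-- what changed: A exponentially brackets the minimum (doubling t2 until the height returns above its t=0 value) and then binary-searches on the SIGN of the adjacent-step height difference h(t+1)>h(t); B instead runs a ternary search on the unimodal height over the fixed range [0, 2^64], comparing the height VALUES at two interior probes m1,m2 and shrinking a third of the range per step, finishing with a scan of the <=3 remaining candidates; the height itself is computed in one min/max pass instead of building coordinate lists and a bounding-box tuple.
-- outside the precondition, e.g. on search([(0, 0, 0, 0), (0, 5, 0, 0)]): A returns 1, B returns 18446744073709551616; on search([(0, 0, 0, 1), (0, 10, 0, 1), (0, 5, 0, 0)]): A returns 1, B returns 5; on search([]): A raises ValueError, B raises IndexError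
import Mathlib
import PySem

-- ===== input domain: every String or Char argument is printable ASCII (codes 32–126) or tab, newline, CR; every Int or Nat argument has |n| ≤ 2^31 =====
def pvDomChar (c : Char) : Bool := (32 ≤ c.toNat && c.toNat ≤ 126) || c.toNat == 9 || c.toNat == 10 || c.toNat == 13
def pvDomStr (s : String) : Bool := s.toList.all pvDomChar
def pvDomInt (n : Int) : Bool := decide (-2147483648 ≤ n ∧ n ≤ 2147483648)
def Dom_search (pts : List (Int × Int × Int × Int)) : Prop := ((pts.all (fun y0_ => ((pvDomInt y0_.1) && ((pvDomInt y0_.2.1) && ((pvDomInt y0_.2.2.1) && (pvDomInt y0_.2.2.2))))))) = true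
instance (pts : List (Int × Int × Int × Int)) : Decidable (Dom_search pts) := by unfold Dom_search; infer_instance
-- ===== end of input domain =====

-- B replaces A's double-then-bisect on the sign of h(t+1)-h(t) by a ternary
-- search on the unimodal height over [0, 2^64] (value comparisons at two
-- interior probes, then a ≤3-cell scan); same results on Pre_.

-- ===== PORT A =====
def simulateA (pts : List (Int × Int × Int × Int)) (t : Int) : List (Int × Int) :=
  let xs := pts.map (fun p => p.1 + t * p.2.2.1)
  let ys := pts.map (fun p => p.2.1 + t * p.2.2.2)
  xs.zip ys

-- Python's min()/max() raise ValueError on an empty sequence; Pre_search excludes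
-- the empty list, so the `.getD 0` defaults are never reached on claimed inputs.
def boxA (pts : List (Int × Int)) : Int × Int × Int × Int :=
  let minx := (PySem.List.min? (pts.map (fun p => p.1)) (fun v => v)).getD 0
  let maxx := (PySem.List.max? (pts.map (fun p => p.1)) (fun v => v)).getD 0
  let miny := (PySem.List.min? (pts.map (fun p => p.2)) (fun v => v)).getD 0
  let maxy := (PySem.List.max? (pts.map (fun p => p.2)) (fun v => v)).getD 0
  (minx, miny, maxx - minx, maxy - miny)

-- box(simulate(pts, t))[3], the expression A evaluates at each probed time
def hA (pts : List (Int × Int × Int × Int)) (t : Int) : Int :=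
  (boxA (simulateA pts t)).2.2.2

-- `while f1 > box(simulate(pts, t2))[3]: t2 <<= 1` — fuel-guarded recursion; on
-- Dom_search ∧ Pre_search the loop stops within 100 doublings (proved below), so
-- the fuel-exhausted branch is unreachable on all claimed inputs.
def gallopA (pts : List (Int × Int × Int × Int)) (f1 : Int) : Nat → Int → Int
  | 0, t2 => t2
  | fuel + 1, t2 => if f1 > hA pts t2 then gallopA pts f1 fuel (t2 * 2) else t2

-- `while t1 != t2: …` — the loop keeps t1 ≤ t2 throughout, so the test is written
-- t1 < t2 (equivalent on every reachable state) to provide a termination measure.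
-- fuel-guarded like gallopA: each pass halves t2 - t1, and the claimed inputs
-- keep t2 - t1 < 2^200 (proved below), so the fuel-exhausted branch is unreachable.
def bisectA (pts : List (Int × Int × Int × Int)) : Nat → Int → Int → Int
  | 0, t1, _ => t1
  | fuel + 1, t1, t2 =>
    if t1 < t2 then
      if hA pts (PySem.Int.floordiv (t1 + t2) 2 + 1) > hA pts (PySem.Int.floordiv (t1 + t2) 2) then
        bisectA pts fuel t1 (PySem.Int.floordiv (t1 + t2) 2)
      else
        bisectA pts fuel (PySem.Int.floordiv (t1 + t2) 2 + 1) t2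
    else t1

def search (pts : List (Int × Int × Int × Int)) : Int :=
  let f1 := hA pts 0
  bisectA pts 200 0 (gallopA pts f1 100 1)

-- ===== PORT B =====
-- pts[0] raises IndexError on the empty list (outside Pre_search); the `.headD`
-- default is never reached on claimed inputs.
def heightB (pts : List (Int × Int × Int × Int)) (t : Int) : Int :=
  let p0 := pts.headD (0, 0, 0, 0)
  let y0 := p0.2.1 + t * p0.2.2.2
  let lh := (pts.drop 1).foldl
    (fun (acc : Int × Int) p =>
      let y := p.2.1 + t * p.2.2.2
      if y < acc.1 then (y, acc.2) else if y > acc.2 then (acc.1, y) else acc)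
    (y0, y0)
  lh.2 - lh.1

-- final scan of the ≤ 3 candidates left when the ternary loop exits
def scanB (pts : List (Int × Int × Int × Int)) (lo hi : Int) : Int :=
  (PySem.List.pyRange (lo + 1) (hi + 1) 1).foldl
    (fun best t => if heightB pts t ≤ heightB pts best then t else best) lo

-- `while hi - lo >= 3: …` — ternary step, cutting a third of the range; fuel-guarded:
-- on the claimed inputs 200 passes always reach hi - lo < 3 (proved below), so the
-- fuel-exhausted branch is unreachable.
def ternB (pts : List (Int × Int × Int × Int)) : Nat → Int → Int → Int
  | 0, lo, hi => scanB pts lo hi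
  | fuel + 1, lo, hi =>
    if lo + 3 ≤ hi then
      if heightB pts (lo + PySem.Int.floordiv (hi - lo) 3)
          < heightB pts (hi - PySem.Int.floordiv (hi - lo) 3) then
        ternB pts fuel lo (hi - PySem.Int.floordiv (hi - lo) 3 - 1)
      else
        ternB pts fuel (lo + PySem.Int.floordiv (hi - lo) 3 + 1) hi
    else scanB pts lo hi

def search_alt (pts : List (Int × Int × Int × Int)) : Int :=
  ternB pts 200 0 18446744073709551616

-- ===== PRECONDITION & SPEC =====
-- bounding-box height of pts at time t (0 on the empty list; Pre_ uses t ∈ {0,1,2})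
def pvHeights (pts : List (Int × Int × Int × Int)) (t : Int) : Int :=
  let ys := pts.map (fun p => p.2.1 + t * p.2.2.2)
  ys.foldl max (ys.headD 0) - ys.foldl min (ys.headD 0)

-- Pre_search excludes (i) the empty list, on which A raises ValueError, and (ii)
-- inputs whose height is equal at t = 0 and t = 1 and does not increase at t = 2:
-- there the minimal height is attained on a plateau containing t = 0 and t = 1 and
-- the reported time is an arbitrary tie — A returns 1, B the end of the plateau.
def Pre_search (pts : List (Int × Int × Int × Int)) : Prop :=
  pts ≠ [] ∧ (pvHeights pts 1 ≠ pvHeights pts 0 ∨ pvHeights pts 1 < pvHeights pts 2)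
instance (pts : List (Int × Int × Int × Int)) : Decidable (Pre_search pts) := by
  unfold Pre_search; infer_instance

def pvWitness_search : (List (Int × Int × Int × Int)) := [(0, 3, 0, -1), (0, 0, 0, 1)]

def Spec_search (pts : List (Int × Int × Int × Int)) (out : Int) : Prop := out = search_alt pts
instance (pts : List (Int × Int × Int × Int)) (out : Int) : Decidable (Spec_search pts out) := by unfold Spec_search; infer_instance

-- ===== CLAIM (what is proved, stated in full; the proofs are below) =====
def Claim_equal_search : Prop := ∀ (pts : List (Int × Int × Int × Int)), Dom_search pts → Pre_search pts → Spec_search pts (search pts)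

-- ===== LEMMAS AND PROOFS =====

-- the y-coordinate of p at time t
def affP (p : Int × Int × Int × Int) (t : Int) : Int := p.2.1 + t * p.2.2.2

-- running max / min of the y-coordinates at time t, over head a and tail l
def MxP (a : Int × Int × Int × Int) (l : List (Int × Int × Int × Int)) (t : Int) : Int :=
  l.foldl (fun acc p => max acc (affP p t)) (affP a t)
def MnP (a : Int × Int × Int × Int) (l : List (Int × Int × Int × Int)) (t : Int) : Int :=
  l.foldl (fun acc p => min acc (affP p t)) (affP a t)
def HgtP (a : Int × Int × Int × Int) (l : List (Int × Int × Int × Int)) (t : Int) : Int :=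
  MxP a l t - MnP a l t
def DP (a : Int × Int × Int × Int) (l : List (Int × Int × Int × Int)) (t : Int) : Int :=
  HgtP a l (t + 1) - HgtP a l t

-- generic foldl-max/min facts
theorem foldl_max_init_le {α : Type} (f : α → Int) :
    ∀ (l : List α) (x : Int), x ≤ l.foldl (fun acc p => max acc (f p)) x := by
  intro l
  induction l with
  | nil => intro x; simp
  | cons h t ih =>
      intro x
      calc x ≤ max x (f h) := le_max_left _ _
        _ ≤ _ := ih _

theorem foldl_max_mem_le {α : Type} (f : α → Int) :
    ∀ (l : List α) (x : Int) (p : α), p ∈ l → f p ≤ l.foldl (fun acc p => max acc (f p)) x := by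
  intro l
  induction l with
  | nil => intro x p hp; simp at hp
  | cons h t ih =>
      intro x p hp
      rcases List.mem_cons.mp hp with h1 | h1
      · subst h1
        calc f p ≤ max x (f p) := le_max_right _ _
          _ ≤ _ := foldl_max_init_le f t _
      · exact ih _ _ h1

theorem foldl_max_attain {α : Type} (f : α → Int) :
    ∀ (l : List α) (x : Int),
      l.foldl (fun acc p => max acc (f p)) x = x ∨
      ∃ p ∈ l, l.foldl (fun acc p => max acc (f p)) x = f p := by
  intro l
  induction l with
  | nil => intro x; left; simp
  | cons h t ih =>
      intro x
      rcases ih (max x (f h)) with h1 | ⟨p, hp, h1⟩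
      · simp only [List.foldl_cons]
        rcases max_choice x (f h) with h2 | h2
        · rw [h1, h2]; left; rfl
        · right; exact ⟨h, List.mem_cons_self, by rw [h1, h2]⟩
      · right; exact ⟨p, List.mem_cons_of_mem _ hp, h1⟩

theorem foldl_min_init_le {α : Type} (f : α → Int) :
    ∀ (l : List α) (x : Int), l.foldl (fun acc p => min acc (f p)) x ≤ x := by
  intro l
  induction l with
  | nil => intro x; simp
  | cons h t ih =>
      intro x
      simp only [List.foldl_cons]
      exact le_trans (ih (min x (f h))) (min_le_left _ _)

theorem foldl_min_mem_le {α : Type} (f : α → Int) :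
    ∀ (l : List α) (x : Int) (p : α), p ∈ l → l.foldl (fun acc p => min acc (f p)) x ≤ f p := by
  intro l
  induction l with
  | nil => intro x p hp; simp at hp
  | cons h t ih =>
      intro x p hp
      rcases List.mem_cons.mp hp with h1 | h1
      · subst h1
        calc _ ≤ min x (f p) := foldl_min_init_le f t _
          _ ≤ f p := min_le_right _ _
      · exact ih _ _ h1

theorem foldl_min_attain {α : Type} (f : α → Int) :
    ∀ (l : List α) (x : Int),
      l.foldl (fun acc p => min acc (f p)) x = x ∨
      ∃ p ∈ l, l.foldl (fun acc p => min acc (f p)) x = f p := by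
  intro l
  induction l with
  | nil => intro x; left; simp
  | cons h t ih =>
      intro x
      rcases ih (min x (f h)) with h1 | ⟨p, hp, h1⟩
      · simp only [List.foldl_cons]
        rcases min_choice x (f h) with h2 | h2
        · rw [h1, h2]; left; rfl
        · right; exact ⟨h, List.mem_cons_self, by rw [h1, h2]⟩
      · right; exact ⟨p, List.mem_cons_of_mem _ hp, h1⟩

-- bounds specialised to MxP / MnP over head-or-tail points
theorem le_MxP (a : Int × Int × Int × Int) (l : List (Int × Int × Int × Int)) (t : Int)
    (p : Int × Int × Int × Int) (hp : p = a ∨ p ∈ l) : affP p t ≤ MxP a l t := by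
  rcases hp with h | h
  · subst h; exact foldl_max_init_le _ l _
  · exact foldl_max_mem_le _ l _ _ h

theorem MnP_le (a : Int × Int × Int × Int) (l : List (Int × Int × Int × Int)) (t : Int)
    (p : Int × Int × Int × Int) (hp : p = a ∨ p ∈ l) : MnP a l t ≤ affP p t := by
  rcases hp with h | h
  · subst h; exact foldl_min_init_le _ l _
  · exact foldl_min_mem_le _ l _ _ h

theorem MxP_attain (a : Int × Int × Int × Int) (l : List (Int × Int × Int × Int)) (t : Int) :
    ∃ p, (p = a ∨ p ∈ l) ∧ MxP a l t = affP p t := by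
  rcases foldl_max_attain (fun p => affP p t) l (affP a t) with h | ⟨p, hp, h⟩
  · exact ⟨a, Or.inl rfl, h⟩
  · exact ⟨p, Or.inr hp, h⟩

theorem MnP_attain (a : Int × Int × Int × Int) (l : List (Int × Int × Int × Int)) (t : Int) :
    ∃ p, (p = a ∨ p ∈ l) ∧ MnP a l t = affP p t := by
  rcases foldl_min_attain (fun p => affP p t) l (affP a t) with h | ⟨p, hp, h⟩
  · exact ⟨a, Or.inl rfl, h⟩
  · exact ⟨p, Or.inr hp, h⟩

-- convexity of the running max, concavity of the running min (affine crossings)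
theorem MxP_step (a : Int × Int × Int × Int) (l : List (Int × Int × Int × Int))
    (s t : Int) (hst : s ≤ t) :
    MxP a l (s + 1) + MxP a l t ≤ MxP a l s + MxP a l (t + 1) := by
  obtain ⟨i, hi, hI⟩ := MxP_attain a l (s + 1)
  obtain ⟨j, hj, hJ⟩ := MxP_attain a l t
  by_cases hv : i.2.2.2 ≤ j.2.2.2
  · have b1 : affP i s ≤ MxP a l s := le_MxP a l s i hi
    have b2 : affP j (t + 1) ≤ MxP a l (t + 1) := le_MxP a l (t + 1) j hj
    simp only [affP] at *
    nlinarith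
  · have b1 : affP j s ≤ MxP a l s := le_MxP a l s j hj
    have b2 : affP i (t + 1) ≤ MxP a l (t + 1) := le_MxP a l (t + 1) i hi
    have hmul : (t - s) * (j.2.2.2 - i.2.2.2) ≤ 0 :=
      mul_nonpos_of_nonneg_of_nonpos (by omega) (by omega)
    simp only [affP] at *
    nlinarith

theorem MnP_step (a : Int × Int × Int × Int) (l : List (Int × Int × Int × Int))
    (s t : Int) (hst : s ≤ t) :
    MnP a l s + MnP a l (t + 1) ≤ MnP a l (s + 1) + MnP a l t := by
  obtain ⟨i, hi, hI⟩ := MnP_attain a l (s + 1)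
  obtain ⟨j, hj, hJ⟩ := MnP_attain a l t
  by_cases hv : i.2.2.2 ≤ j.2.2.2
  · have b1 : MnP a l s ≤ affP j s := MnP_le a l s j hj
    have b2 : MnP a l (t + 1) ≤ affP i (t + 1) := MnP_le a l (t + 1) i hi
    have hmul : (t - s) * (i.2.2.2 - j.2.2.2) ≤ 0 :=
      mul_nonpos_of_nonneg_of_nonpos (by omega) (by omega)
    simp only [affP] at *
    nlinarith
  · have b1 : MnP a l s ≤ affP i s := MnP_le a l s i hi
    have b2 : MnP a l (t + 1) ≤ affP j (t + 1) := MnP_le a l (t + 1) j hj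
    simp only [affP] at *
    nlinarith

theorem DP_mono (a : Int × Int × Int × Int) (l : List (Int × Int × Int × Int))
    (s t : Int) (hst : s ≤ t) : DP a l s ≤ DP a l t := by
  have h1 := MxP_step a l s t hst
  have h2 := MnP_step a l s t hst
  simp only [DP, HgtP] at *
  omega

-- the ports' height computations (and pvHeights) all equal HgtP
theorem hA_eq (a : Int × Int × Int × Int) (l : List (Int × Int × Int × Int)) (t : Int) :
    hA (a :: l) t = HgtP a l t := by
  have hsnd : ((((a :: l).map (fun p => p.1 + t * p.2.2.1)).zip
      ((a :: l).map (fun p => p.2.1 + t * p.2.2.2))).map (fun p => p.2)) =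
      ((a :: l).map (fun p => p.2.1 + t * p.2.2.2)) := List.map_snd_zip (by simp)
  simp only [hA, simulateA, boxA, hsnd]
  simp only [List.map_cons, PySem.List.max?_id_cons, PySem.List.min?_id_cons, Option.getD_some]
  simp only [List.foldl_map, HgtP, MxP, MnP, affP]

theorem pairfoldB (t : Int) : ∀ (l : List (Int × Int × Int × Int)) (lo hi : Int), lo ≤ hi →
    l.foldl (fun (acc : Int × Int) p =>
        let y := p.2.1 + t * p.2.2.2
        if y < acc.1 then (y, acc.2) else if y > acc.2 then (acc.1, y) else acc) (lo, hi)
      = (l.foldl (fun acc p => min acc (affP p t)) lo,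
         l.foldl (fun acc p => max acc (affP p t)) hi) := by
  intro l
  induction l with
  | nil => intro lo hi h; simp
  | cons p l ih =>
      intro lo hi h
      simp only [List.foldl_cons, affP]
      by_cases h1 : p.2.1 + t * p.2.2.2 < lo
      · rw [if_pos h1]
        rw [min_eq_right (le_of_lt h1), max_eq_left (by omega)]
        exact ih _ _ (by omega)
      · rw [if_neg h1]
        by_cases h2 : p.2.1 + t * p.2.2.2 > hi
        · rw [if_pos h2]
          rw [min_eq_left (by omega), max_eq_right (by omega)]
          exact ih _ _ (by omega)
        · rw [if_neg h2]
          rw [min_eq_left (by omega), max_eq_left (by omega)]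
          exact ih _ _ h

theorem heightB_eq (a : Int × Int × Int × Int) (l : List (Int × Int × Int × Int)) (t : Int) :
    heightB (a :: l) t = HgtP a l t := by
  simp only [heightB, List.headD_cons, List.drop_one, List.tail_cons]
  rw [pairfoldB t l _ _ (le_refl _)]
  simp only [HgtP, MxP, MnP, affP]

theorem pvHeights_eq (a : Int × Int × Int × Int) (l : List (Int × Int × Int × Int)) (t : Int) :
    pvHeights (a :: l) t = HgtP a l t := by
  simp only [pvHeights, List.map_cons, List.headD_cons, List.foldl_cons, max_self, min_self]
  simp only [List.foldl_map, HgtP, MxP, MnP, affP]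

-- characterisation of N = least n with DP n > 0
theorem DP_pos_iff (a : Int × Int × Int × Int) (l : List (Int × Int × Int × Int))
    (hex : ∃ n : Nat, 0 < DP a l (n : Int)) (t : Int) (ht : 0 ≤ t) :
    (0 < DP a l t ↔ ((Nat.find hex : Nat) : Int) ≤ t) := by
  constructor
  · intro hpos
    by_contra hlt
    push_neg at hlt
    have h1 : t.toNat < Nat.find hex := by omega
    have h2 := Nat.find_min hex h1
    rw [show ((t.toNat : Nat) : Int) = t by omega] at h2
    exact h2 hpos
  · intro hle
    have h1 := Nat.find_spec hex
    exact lt_of_lt_of_le h1 (DP_mono a l _ _ hle)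

-- the height is non-increasing while the step difference stays ≤ 0
theorem Hgt_anti (a : Int × Int × Int × Int) (l : List (Int × Int × Int × Int)) (Bnd : Int)
    (hD : ∀ u : Int, 0 ≤ u → u < Bnd → DP a l u ≤ 0) :
    ∀ (k : Nat) (v : Int), 0 ≤ v → v + k ≤ Bnd → HgtP a l (v + k) ≤ HgtP a l v := by
  intro k
  induction k with
  | zero => intro v _ _; simp
  | succ k ih =>
      intro v hv hvk
      have hstep : HgtP a l (v + 1) ≤ HgtP a l v := by
        have := hD v hv (by push_cast at hvk ⊢; omega)
        simp only [DP] at this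
        omega
      have := ih (v + 1) (by omega) (by push_cast at hvk ⊢; omega)
      calc HgtP a l (v + (k + 1 : Nat)) = HgtP a l ((v + 1) + k) := by
              push_cast; ring_nf
        _ ≤ HgtP a l (v + 1) := this
        _ ≤ HgtP a l v := hstep

-- Dom_search bounds the y-coordinates
theorem dom_y_bound (pts : List (Int × Int × Int × Int)) (hdom : Dom_search pts)
    (p : Int × Int × Int × Int) (hp : p ∈ pts) :
    -2147483648 ≤ p.2.1 ∧ p.2.1 ≤ 2147483648 := by
  unfold Dom_search at hdom
  rw [List.all_eq_true] at hdom
  have := hdom p hp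
  simp only [pvDomInt, Bool.and_eq_true, decide_eq_true_eq] at this
  exact this.2.1

-- with two slopes differing, the height at 2^64 beats the height at 0
theorem Hgt_big (a : Int × Int × Int × Int) (l : List (Int × Int × Int × Int))
    (hdom : Dom_search (a :: l)) (p q : Int × Int × Int × Int)
    (hp : p = a ∨ p ∈ l) (hq : q = a ∨ q ∈ l) (hv : q.2.2.2 < p.2.2.2) :
    HgtP a l 0 < HgtP a l (18446744073709551616 : Int) := by
  have hmem : ∀ r : Int × Int × Int × Int, (r = a ∨ r ∈ l) → r ∈ a :: l := by
    intro r hr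
    rcases hr with h | h
    · subst h; exact List.mem_cons_self
    · exact List.mem_cons_of_mem _ h
  obtain ⟨r1, hr1, hR1⟩ := MxP_attain a l 0
  obtain ⟨r2, hr2, hR2⟩ := MnP_attain a l 0
  have hb1 := dom_y_bound _ hdom r1 (hmem r1 hr1)
  have hb2 := dom_y_bound _ hdom r2 (hmem r2 hr2)
  have hbp := dom_y_bound _ hdom p (hmem p hp)
  have hbq := dom_y_bound _ hdom q (hmem q hq)
  have hT1 : affP p (18446744073709551616 : Int) ≤ MxP a l (18446744073709551616 : Int) :=
    le_MxP a l _ p hp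
  have hT2 : MnP a l (18446744073709551616 : Int) ≤ affP q (18446744073709551616 : Int) :=
    MnP_le a l _ q hq
  have hprod : (18446744073709551616 : Int) ≤
      18446744073709551616 * p.2.2.2 - 18446744073709551616 * q.2.2.2 := by
    nlinarith
  simp only [affP] at hT1 hT2
  simp only [HgtP, hR1, hR2, affP]
  omega

-- if every slope equals the head's, the height is constant in t
theorem foldl_max_shift (t c : Int) : ∀ (l : List (Int × Int × Int × Int)) (x : Int),
    (∀ p ∈ l, p.2.2.2 = c) →
    l.foldl (fun acc p => max acc (affP p t)) (x + t * c)
      = l.foldl (fun acc p => max acc (affP p 0)) x + t * c := by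
  intro l
  induction l with
  | nil => intro x _; simp
  | cons p l ih =>
      intro x hc
      simp only [List.foldl_cons]
      have hp : p.2.2.2 = c := hc p List.mem_cons_self
      have : affP p t = affP p 0 + t * c := by simp only [affP, hp]; ring
      rw [this, max_add_add_right]
      exact ih _ (fun q hq => hc q (List.mem_cons_of_mem _ hq))

theorem foldl_min_shift (t c : Int) : ∀ (l : List (Int × Int × Int × Int)) (x : Int),
    (∀ p ∈ l, p.2.2.2 = c) →
    l.foldl (fun acc p => min acc (affP p t)) (x + t * c)
      = l.foldl (fun acc p => min acc (affP p 0)) x + t * c := by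
  intro l
  induction l with
  | nil => intro x _; simp
  | cons p l ih =>
      intro x hc
      simp only [List.foldl_cons]
      have hp : p.2.2.2 = c := hc p List.mem_cons_self
      have : affP p t = affP p 0 + t * c := by simp only [affP, hp]; ring
      rw [this, min_add_add_right]
      exact ih _ (fun q hq => hc q (List.mem_cons_of_mem _ hq))

theorem Hgt_const (a : Int × Int × Int × Int) (l : List (Int × Int × Int × Int))
    (hsame : ∀ p ∈ l, p.2.2.2 = a.2.2.2) (t : Int) : HgtP a l t = HgtP a l 0 := by
  have haff : affP a t = affP a 0 + t * a.2.2.2 := by simp only [affP]; ring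
  have hmx : MxP a l t = MxP a l 0 + t * a.2.2.2 := by
    simp only [MxP, haff]
    exact foldl_max_shift t a.2.2.2 l (affP a 0) hsame
  have hmn : MnP a l t = MnP a l 0 + t * a.2.2.2 := by
    simp only [MnP, haff]
    exact foldl_min_shift t a.2.2.2 l (affP a 0) hsame
  simp only [HgtP, hmx, hmn]
  ring

-- inside Dom ∧ Pre the height eventually beats h(0)
theorem hbig_of (a : Int × Int × Int × Int) (l : List (Int × Int × Int × Int))
    (hdom : Dom_search (a :: l)) (hpre : Pre_search (a :: l)) :
    HgtP a l 0 < HgtP a l (18446744073709551616 : Int) := by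
  by_cases hsame : ∀ p ∈ l, p.2.2.2 = a.2.2.2
  · exfalso
    obtain ⟨-, hpre2⟩ := hpre
    rw [pvHeights_eq, pvHeights_eq, pvHeights_eq] at hpre2
    rw [Hgt_const a l hsame 1, Hgt_const a l hsame 2] at hpre2
    omega
  · push_neg at hsame
    obtain ⟨b, hb, hvb⟩ := hsame
    rcases lt_or_gt_of_ne hvb with h | h
    · exact Hgt_big a l hdom a b (Or.inl rfl) (Or.inr hb) h
    · exact Hgt_big a l hdom b a (Or.inr hb) (Or.inl rfl) h

theorem exists_pos (a : Int × Int × Int × Int) (l : List (Int × Int × Int × Int))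
    (hbig : HgtP a l 0 < HgtP a l (18446744073709551616 : Int)) :
    ∃ n : Nat, n < 18446744073709551616 ∧ 0 < DP a l (n : Int) := by
  by_contra hno
  push_neg at hno
  have hD : ∀ u : Int, 0 ≤ u → u < 18446744073709551616 → DP a l u ≤ 0 := by
    intro u hu hub
    have := hno u.toNat (by omega)
    rwa [show ((u.toNat : Nat) : Int) = u by omega] at this
  have := Hgt_anti a l 18446744073709551616 hD 18446744073709551616 0 (le_refl _) (by norm_num)
  norm_num at this
  omega

-- the height is non-increasing up to N = Nat.find hex …
theorem Hgt_mono_before (a : Int × Int × Int × Int) (l : List (Int × Int × Int × Int))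
    (hex : ∃ n : Nat, 0 < DP a l (n : Int)) (s t : Int)
    (hs : 0 ≤ s) (hst : s ≤ t) (htN : t ≤ ((Nat.find hex : Nat) : Int)) :
    HgtP a l t ≤ HgtP a l s := by
  have hD : ∀ u : Int, 0 ≤ u → u < ((Nat.find hex : Nat) : Int) → DP a l u ≤ 0 := by
    intro u hu hub
    by_contra h'
    have := (DP_pos_iff a l hex u hu).mp (by omega)
    omega
  have := Hgt_anti a l ((Nat.find hex : Nat) : Int) hD (t - s).toNat s hs (by omega)
  rwa [show s + (((t - s).toNat : Nat) : Int) = t by omega] at this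

-- … and strictly increasing from N on
theorem Hgt_strict_after (a : Int × Int × Int × Int) (l : List (Int × Int × Int × Int))
    (hex : ∃ n : Nat, 0 < DP a l (n : Int)) (s t : Int)
    (hNs : ((Nat.find hex : Nat) : Int) ≤ s) (hst : s < t) :
    HgtP a l s < HgtP a l t := by
  have hstep : ∀ u : Int, ((Nat.find hex : Nat) : Int) ≤ u → HgtP a l u < HgtP a l (u + 1) := by
    intro u hu
    have h0u : (0 : Int) ≤ u := le_trans (by positivity) hu
    have := (DP_pos_iff a l hex u h0u).mpr hu
    simp only [DP] at this
    omega
  have hk : ∀ (k : Nat) (u : Int), ((Nat.find hex : Nat) : Int) ≤ u →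
      HgtP a l u < HgtP a l (u + 1 + k) := by
    intro k
    induction k with
    | zero => intro u hu; simpa using hstep u hu
    | succ k ih =>
        intro u hu
        have h1 := ih u hu
        have h2 := hstep (u + 1 + k) (by push_cast; omega)
        calc HgtP a l u < HgtP a l (u + 1 + k) := h1
          _ < HgtP a l (u + 1 + k + 1) := h2
          _ = HgtP a l (u + 1 + (k + 1 : Nat)) := by push_cast; ring_nf
  have := hk (t - s - 1).toNat s hNs
  rwa [show s + 1 + (((t - s - 1).toNat : Nat) : Int) = t by omega] at this

-- the final scan returns N when it lies in the (≤ 3-cell) window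
theorem scanB_N (a : Int × Int × Int × Int) (l : List (Int × Int × Int × Int))
    (hex : ∃ n : Nat, 0 < DP a l (n : Int)) (lo hi : Int)
    (hlo : 0 ≤ lo) (hloN : lo ≤ ((Nat.find hex : Nat) : Int))
    (hNhi : ((Nat.find hex : Nat) : Int) ≤ hi) (hd : hi ≤ lo + 2) :
    scanB (a :: l) lo hi = ((Nat.find hex : Nat) : Int) := by
  set N : Int := ((Nat.find hex : Nat) : Int) with hNdef
  rw [scanB]
  have hcase : hi - lo = 0 ∨ hi - lo = 1 ∨ hi - lo = 2 := by omega
  rcases hcase with h | h | h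
  · -- hi = lo
    rw [show hi + 1 = lo + 1 by omega, PySem.List.pyRange_one_eq_nil (by omega)]
    simp only [List.foldl_nil]
    omega
  · -- hi = lo + 1
    rw [show hi + 1 = (lo + 1) + 1 by omega, PySem.List.pyRange_one_singleton]
    simp only [List.foldl_cons, List.foldl_nil, heightB_eq]
    by_cases hN : N = lo
    · rw [if_neg (by have := Hgt_strict_after a l hex lo (lo + 1) (by omega) (by omega); omega)]
      omega
    · have hNl : N = lo + 1 := by omega
      rw [if_pos (Hgt_mono_before a l hex lo (lo + 1) hlo (by omega) (by omega))]
      omega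
  · -- hi = lo + 2
    rw [show hi + 1 = lo + 1 + 2 by omega]
    rw [PySem.List.pyRange_one_cons (by omega),
        show lo + 1 + 1 = (lo + 2) + 0 by ring,
        show lo + 1 + 2 = (lo + 2) + 1 by ring]
    rw [show (lo + 2) + (0:Int) = lo + 2 by ring, PySem.List.pyRange_one_singleton]
    simp only [List.foldl_cons, List.foldl_nil, heightB_eq]
    by_cases hN0 : N = lo
    · have s1 := Hgt_strict_after a l hex lo (lo + 1) (by omega) (by omega)
      have s2 := Hgt_strict_after a l hex lo (lo + 2) (by omega) (by omega)
      have c1 : ¬ HgtP a l (lo + 1) ≤ HgtP a l lo := by omega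
      rw [if_neg c1]
      have c2 : ¬ HgtP a l (lo + 2) ≤ HgtP a l lo := by omega
      rw [if_neg c2]
      omega
    · by_cases hN1 : N = lo + 1
      · have m1 := Hgt_mono_before a l hex lo (lo + 1) hlo (by omega) (by omega)
        have s2 := Hgt_strict_after a l hex (lo + 1) (lo + 2) (by omega) (by omega)
        rw [if_pos m1]
        have c2 : ¬ HgtP a l (lo + 2) ≤ HgtP a l (lo + 1) := by omega
        rw [if_neg c2]
        omega
      · have hN2 : N = lo + 2 := by omega
        have m1 := Hgt_mono_before a l hex lo (lo + 1) hlo (by omega) (by omega)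
        have m2 := Hgt_mono_before a l hex (lo + 1) (lo + 2) (by omega) (by omega) (by omega)
        rw [if_pos m1]
        rw [if_pos m2]
        omega

-- loop correctness: the ternary search returns N when lo ≤ N ≤ hi and the fuel
-- covers the range ((hi-lo)·2^fuel < 3^fuel: each pass cuts a third of the range)
theorem ternB_N (a : Int × Int × Int × Int) (l : List (Int × Int × Int × Int))
    (hex : ∃ n : Nat, 0 < DP a l (n : Int)) :
    ∀ (fuel : Nat) (lo hi : Int), (hi - lo).toNat * 2 ^ fuel < 3 ^ fuel → 0 ≤ lo →
      lo ≤ ((Nat.find hex : Nat) : Int) → ((Nat.find hex : Nat) : Int) ≤ hi →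
      ternB (a :: l) fuel lo hi = ((Nat.find hex : Nat) : Int) := by
  intro fuel
  induction fuel with
  | zero =>
      intro lo hi hb hlo hloN hNhi
      simp only [pow_zero, mul_one] at hb
      simp only [ternB]
      exact scanB_N a l hex lo hi hlo hloN hNhi (by omega)
  | succ fuel ih =>
      intro lo hi hb hlo hloN hNhi
      set N : Int := ((Nat.find hex : Nat) : Int) with hNdef
      simp only [ternB]
      by_cases hd : lo + 3 ≤ hi
      · rw [if_pos hd]
        have hfd : PySem.Int.floordiv (hi - lo) 3 = (hi - lo) / 3 :=
          PySem.Int.floordiv_eq_ediv_of_pos (by omega)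
        rw [hfd, heightB_eq, heightB_eq]
        have h1 : 1 ≤ (hi - lo) / 3 := by omega
        have h2 : (hi - lo) / 3 * 3 ≤ hi - lo := by omega
        -- the shrunken range still fits the remaining fuel
        have hshrink : ∀ d' : Int, 3 * d' ≤ 2 * (hi - lo) → 0 ≤ d' →
            d'.toNat * 2 ^ fuel < 3 ^ fuel := by
          intro d' h3 h0
          have hp2 : (2 : Nat) ^ (fuel + 1) = 2 * 2 ^ fuel := by rw [pow_succ]; ring
          have hp3 : (3 : Nat) ^ (fuel + 1) = 3 * 3 ^ fuel := by rw [pow_succ]; ring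
          rw [hp2, hp3] at hb
          have h3n : 3 * d'.toNat ≤ 2 * (hi - lo).toNat := by omega
          have hchain : 3 * (d'.toNat * 2 ^ fuel) < 3 * 3 ^ fuel := by
            calc 3 * (d'.toNat * 2 ^ fuel) = (3 * d'.toNat) * 2 ^ fuel := by ring
              _ ≤ (2 * (hi - lo).toNat) * 2 ^ fuel :=
                  Nat.mul_le_mul_right _ h3n
              _ = (hi - lo).toNat * (2 * 2 ^ fuel) := by ring
              _ < 3 * 3 ^ fuel := hb
          omega
        by_cases hc : HgtP a l (lo + (hi - lo) / 3) < HgtP a l (hi - (hi - lo) / 3)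
        · rw [if_pos hc]
          have hN' : N ≤ hi - (hi - lo) / 3 - 1 := by
            by_contra hcon
            push_neg at hcon
            have := Hgt_mono_before a l hex (lo + (hi - lo) / 3) (hi - (hi - lo) / 3)
              (by omega) (by omega) (by omega)
            omega
          exact ih lo (hi - (hi - lo) / 3 - 1)
            (hshrink (hi - (hi - lo) / 3 - 1 - lo) (by omega) (by omega)) hlo hloN hN'
        · rw [if_neg hc]
          have hN' : lo + (hi - lo) / 3 + 1 ≤ N := by
            by_contra hcon
            push_neg at hcon
            have := Hgt_strict_after a l hex (lo + (hi - lo) / 3) (hi - (hi - lo) / 3)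
              (by omega) (by omega)
            omega
          exact ih (lo + (hi - lo) / 3 + 1) hi
            (hshrink (hi - (lo + (hi - lo) / 3 + 1)) (by omega) (by omega)) (by omega) hN' hNhi
      · rw [if_neg hd]
        exact scanB_N a l hex lo hi hlo hloN hNhi (by omega)

theorem bisectA_N (a : Int × Int × Int × Int) (l : List (Int × Int × Int × Int))
    (hex : ∃ n : Nat, 0 < DP a l (n : Int)) :
    ∀ (fuel : Nat) (t1 t2 : Int), (t2 - t1).toNat < 2 ^ fuel → 0 ≤ t1 →
      t1 ≤ ((Nat.find hex : Nat) : Int) → ((Nat.find hex : Nat) : Int) ≤ t2 →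
      bisectA (a :: l) fuel t1 t2 = ((Nat.find hex : Nat) : Int) := by
  intro fuel
  induction fuel with
  | zero =>
      intro t1 t2 hb hlo hloN hNhi
      simp only [pow_zero] at hb
      simp only [bisectA]
      omega
  | succ fuel ih =>
      intro t1 t2 hb hlo hloN hNhi
      have hP : 1 ≤ 2 ^ fuel := Nat.one_le_two_pow
      have hp2 : (2 : Nat) ^ (fuel + 1) = 2 * 2 ^ fuel := by rw [pow_succ]; ring
      rw [hp2] at hb
      simp only [bisectA]
      by_cases hlh : t1 < t2
      · rw [if_pos hlh]
        have hfd : PySem.Int.floordiv (t1 + t2) 2 = (t1 + t2) / 2 :=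
          PySem.Int.floordiv_eq_ediv_of_pos (by omega)
        have hmid1 : t1 ≤ (t1 + t2) / 2 := by omega
        have hmid2 : (t1 + t2) / 2 < t2 := by omega
        rw [hfd, hA_eq, hA_eq]
        by_cases hP' : 0 < DP a l ((t1 + t2) / 2)
        · rw [if_pos (by simp only [DP] at hP'; omega)]
          have hN : ((Nat.find hex : Nat) : Int) ≤ (t1 + t2) / 2 :=
            (DP_pos_iff a l hex _ (by omega)).mp hP'
          exact ih _ _ (by omega) hlo hloN hN
        · rw [if_neg (by simp only [DP] at hP'; omega)]
          have hN : ¬ ((Nat.find hex : Nat) : Int) ≤ (t1 + t2) / 2 := by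
            intro hc
            exact hP' ((DP_pos_iff a l hex _ (by omega)).mpr hc)
          exact ih _ _ (by omega) (by omega) (by omega) hNhi
      · rw [if_neg hlh]
        omega

-- the doubling loop grows t2 at most one power of two per unit of fuel …
theorem gallopA_le (pts : List (Int × Int × Int × Int)) (f1 : Int) :
    ∀ (fuel : Nat) (t2 : Int), 0 < t2 → gallopA pts f1 fuel t2 ≤ t2 * 2 ^ fuel := by
  intro fuel
  induction fuel with
  | zero => intro t2 ht2; simp [gallopA]
  | succ fuel ih =>
      intro t2 ht2
      rw [gallopA]
      by_cases hc : f1 > hA pts t2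
      · rw [if_pos hc]
        calc gallopA pts f1 fuel (t2 * 2) ≤ t2 * 2 * 2 ^ fuel := ih (t2 * 2) (by omega)
          _ = t2 * 2 ^ (fuel + 1) := by ring
      · rw [if_neg hc]
        calc t2 = t2 * 1 := by ring
          _ ≤ t2 * 2 ^ (fuel + 1) := by
              have : (1 : Int) ≤ 2 ^ (fuel + 1) := one_le_pow₀ (by omega)
              exact mul_le_mul_of_nonneg_left this (by omega)

-- … and returns some t2 > 0 whose height is back above h(0)
theorem gallopA_ge (pts : List (Int × Int × Int × Int)) (f1 : Int) :
    ∀ (fuel : Nat) (t2 : Int), 0 < t2 → (∃ k : Nat, k < fuel ∧ f1 ≤ hA pts (t2 * 2 ^ k)) →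
      0 < gallopA pts f1 fuel t2 ∧ f1 ≤ hA pts (gallopA pts f1 fuel t2) := by
  intro fuel
  induction fuel with
  | zero => intro t2 _ ⟨k, hk, _⟩; omega
  | succ fuel ih =>
      intro t2 ht2 ⟨k, hk, hkle⟩
      rw [gallopA]
      by_cases hc : f1 > hA pts t2
      · rw [if_pos hc]
        apply ih (t2 * 2) (by omega)
        match k, hkle with
        | 0, hkle => simp at hkle; omega
        | k + 1, hkle =>
            exact ⟨k, by omega, by rw [show t2 * 2 * 2 ^ k = t2 * 2 ^ (k + 1) by ring]; exact hkle⟩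
      · rw [if_neg hc]
        exact ⟨ht2, by omega⟩

-- ===== VERDICT (by name: the statement is the Claim_ definition above) =====
theorem search_spec : Claim_equal_search := by
  intro pts hdom hpre
  match pts with
  | [] => exact absurd rfl hpre.1
  | a :: l =>
    obtain ⟨n0, hn0lt, hn0pos⟩ := exists_pos a l (hbig_of a l hdom hpre)
    have hex : ∃ n : Nat, 0 < DP a l (n : Int) := ⟨n0, hn0pos⟩
    have hNle : Nat.find hex ≤ n0 := Nat.find_min' hex hn0pos
    have hNlt : ((Nat.find hex : Nat) : Int) < 18446744073709551616 := by
      have h1 : Nat.find hex < 18446744073709551616 := lt_of_le_of_lt hNle hn0lt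
      exact_mod_cast h1
    have hB : search_alt (a :: l) = ((Nat.find hex : Nat) : Int) := by
      show ternB (a :: l) 200 0 18446744073709551616 = _
      exact ternB_N a l hex 200 0 18446744073709551616 (by decide) (le_refl 0)
        (by omega) (by omega)
    have hbig := hbig_of a l hdom hpre
    have hgal := gallopA_ge (a :: l) (hA (a :: l) 0) 100 1 (by norm_num)
      ⟨64, by norm_num, by
        rw [hA_eq, hA_eq]
        norm_num
        omega⟩
    obtain ⟨hr_pos, hr_ge⟩ := hgal
    have hNr : ((Nat.find hex : Nat) : Int) ≤ gallopA (a :: l) (hA (a :: l) 0) 100 1 := by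
      set r := gallopA (a :: l) (hA (a :: l) 0) 100 1 with hrdef
      by_contra hc
      push_neg at hc
      have hD : ∀ u : Int, 0 ≤ u → u < ((Nat.find hex : Nat) : Int) → DP a l u ≤ 0 := by
        intro u hu hub
        by_contra h'
        have := (DP_pos_iff a l hex u hu).mp (by omega)
        omega
      have hD0 : DP a l 0 ≤ 0 := hD 0 (le_refl 0) (by omega)
      have hD1 : DP a l 1 ≤ 0 := hD 1 (by omega) (by omega)
      have hpre2 := hpre.2
      rw [pvHeights_eq, pvHeights_eq, pvHeights_eq] at hpre2
      simp only [DP] at hD0 hD1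
      norm_num at hD0 hD1
      have hD0neg : HgtP a l 1 < HgtP a l 0 := by
        rcases hpre2 with h | h
        · omega
        · omega
      have hanti := Hgt_anti a l _ hD ((r - 1).toNat) 1 (by omega) (by omega)
      rw [show ((1 : Int) + (((r - 1).toNat : Nat) : Int)) = r by omega] at hanti
      rw [hA_eq, hA_eq] at hr_ge
      omega
    have hgle : gallopA (a :: l) (hA (a :: l) 0) 100 1 ≤ 1 * 2 ^ 100 :=
      gallopA_le (a :: l) (hA (a :: l) 0) 100 1 (by norm_num)
    have hbnd : ((gallopA (a :: l) (hA (a :: l) 0) 100 1 - 0).toNat) < 2 ^ 200 := by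
      have hl1 : (1 : Int) * 2 ^ 100 = 1267650600228229401496703205376 := by norm_num
      have hl2 : (2 : Nat) ^ 200 =
          1606938044258990275541962092341162602522202993782792835301376 := by norm_num
      rw [hl1] at hgle
      omega
    have hA' : search (a :: l) = ((Nat.find hex : Nat) : Int) := by
      show bisectA (a :: l) 200 0 (gallopA (a :: l) (hA (a :: l) 0) 100 1) = _
      exact bisectA_N a l hex 200 0 _ hbnd (le_refl 0) (by omega) hNr
    show search (a :: l) = search_alt (a :: l)
    rw [hA', hB]
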